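-- pv_equiv track=rewrite | github.com/XiangLi1999/PosteriorControl-NLG | src/utils.py | vseq_2_vit_lst_batch
-- ===== SOURCE A (Python) =====
-- def vseq_2_vit_lst_batch(z_full):
--     bsz = len(z_full)
--     result = []
--     for tt in range(bsz):
--         z = z_full[tt] + [-1]
--         T = len(z)
--         prev_state = -1
--         idx = 0
--         start = []
--         end = []
--         state = []
--         while (idx < T):
--             if prev_state != z[idx]:
--                 state.append(z[idx])
--                 if idx - 1 >= 0:
--                     end.append(idx)
--                 start.append(idx)
--                 prev_state = state[-1]
--             else:
--                 idx += 1
--         end.append(T)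
--         result.append([(a, b, c) for (a, b, c) in zip(start, end, state)])
--     return result
-- ===== SOURCE B (Python) =====
-- def vseq_2_vit_lst_batch(z_full):
--     out = []
--     for seq in z_full:
--         z = seq + [-1]
--         # stage 1: run-length encode z into (value, length) pairs
--         runs = []
--         for v in z:
--             if runs and runs[-1][0] == v:
--                 runs[-1] = (v, runs[-1][1] + 1)
--             else:
--                 runs.append((v, 1))
--         # stage 2: a leading run of -1 matches the initial state and yields no segment;
--         # prefix-sum the remaining run lengths into start positions
--         if runs[0][0] == -1:
--             rest, pos = runs[1:], runs[0][1]
--         else: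
--             rest, pos = runs, 0
--         starts, states = [], []
--         for v, n in rest:
--             starts.append(pos)
--             states.append(v)
--             pos += n
--         # stage 3: ends are the positive boundaries followed by T (zip truncates)
--         ends = [s for s in starts if s >= 1] + [len(z)]
--         out.append(list(zip(starts, ends, states)))
--     return out
-- ===== Notes on version B (the rewrite author's own statement) =====
-- stated objective: alternative
-- what changed: Replaces A's non-advancing while-loop that maintains three parallel start/end/state index lists by a staged pipeline: run-length encode each sentinel-appended sequence into (value,length) pairs, drop a leading -1 run (it matches the initial state), prefix-sum the run lengths into start positions, and pair starts with A's positive-boundaries-plus-T ends rule.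
import Mathlib
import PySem

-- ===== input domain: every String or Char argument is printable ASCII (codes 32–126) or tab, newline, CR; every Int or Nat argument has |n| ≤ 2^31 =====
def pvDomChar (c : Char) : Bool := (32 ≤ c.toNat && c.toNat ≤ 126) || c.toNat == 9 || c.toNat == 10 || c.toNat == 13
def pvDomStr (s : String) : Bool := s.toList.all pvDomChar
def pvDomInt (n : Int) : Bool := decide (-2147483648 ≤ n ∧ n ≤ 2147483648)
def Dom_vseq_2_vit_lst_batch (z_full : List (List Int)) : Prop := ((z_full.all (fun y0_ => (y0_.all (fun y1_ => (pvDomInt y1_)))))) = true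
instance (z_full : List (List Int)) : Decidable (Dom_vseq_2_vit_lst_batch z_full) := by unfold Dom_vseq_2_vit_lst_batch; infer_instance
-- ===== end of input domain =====

-- B replaces A's non-advancing while-loop with three parallel index lists by a staged
-- pipeline: run-length encoding into (value,length) pairs, prefix sums of the run lengths
-- into start positions, and A's positive-boundaries-plus-T ends rule (objective: alternative).

-- ===== PORT A =====
-- the while-loop of A; fuel is only a termination guard (2*len+1 always suffices: each
-- non-advancing step is immediately followed by an advancing one)
def vseqLoopA (z : List Int) : Nat → Nat → Int → List Int → List Int → List Int →
    (List Int × List Int × List Int)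
  | 0, _, _, st, en, sta => (st, en, sta)
  | fuel+1, idx, prev, st, en, sta =>
    if idx < z.length then
      -- z[idx]: always in range here since 0 ≤ idx < len(z)
      let v := z.getD idx 0
      if prev ≠ v then
        vseqLoopA z fuel idx v (st ++ [(idx : Int)])
          (if 1 ≤ idx then en ++ [(idx : Int)] else en) (sta ++ [v])
      else vseqLoopA z fuel (idx+1) prev st en sta
    else (st, en, sta)

def vseq_2_vit_lst_batch (z_full : List (List Int)) : List (List (Int × Int × Int)) :=
  z_full.map (fun zt =>
    let z := zt ++ [-1]
    let T := z.length
    let r := vseqLoopA z (2*T+1) 0 (-1) [] [] []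
    let start := r.1
    let «end» := r.2.1 ++ [(T : Int)]
    let state := r.2.2
    (start.zip («end».zip state)).map (fun p => (p.1, p.2.1, p.2.2)))

-- ===== PORT B =====
-- stage 1 step ("if runs and runs[-1][0] == v: bump last count else append (v,1)"),
-- transcribed with the run list kept in reverse so the mutated last run is the head
def pvRleF (runs : List (Int × Int)) (v : Int) : List (Int × Int) :=
  match runs with
  | (u, n) :: t => if u = v then (u, n + 1) :: t else (v, 1) :: (u, n) :: t
  | [] => [(v, 1)]

def vseq_2_vit_lst_batch_alt (z_full : List (List Int)) : List (List (Int × Int × Int)) :=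
  z_full.map (fun seq =>
    let z := seq ++ [-1]
    let runs := (z.foldl pvRleF []).reverse
    -- a leading run of -1 matches the initial state: it yields no segment
    let rp : List (Int × Int) × Int :=
      match runs with
      | (u, n) :: t => if u = -1 then (t, n) else (runs, 0)
      | [] => ([], 0)
    let sv := rp.1.foldl (fun (acc : List Int × List Int × Int) vn =>
        (acc.1 ++ [acc.2.2], acc.2.1 ++ [vn.1], acc.2.2 + vn.2)) ([], [], rp.2)
    let starts := sv.1
    let states := sv.2.1
    let ends := starts.filter (fun s => 1 ≤ s) ++ [(z.length : Int)]
    (starts.zip (ends.zip states)).map (fun p => (p.1, p.2.1, p.2.2)))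

-- ===== PRECONDITION & SPEC =====
def Spec_vseq_2_vit_lst_batch (z_full : List (List Int)) (out : List (List (Int × Int × Int))) : Prop :=
  out = vseq_2_vit_lst_batch_alt z_full
instance (z_full : List (List Int)) (out : List (List (Int × Int × Int))) :
    Decidable (Spec_vseq_2_vit_lst_batch z_full out) := by
  unfold Spec_vseq_2_vit_lst_batch; infer_instance

-- ===== CLAIM (what is proved, stated in full; the proofs are below) =====
def Claim_equal_vseq_2_vit_lst_batch : Prop :=
  ∀ (z_full : List (List Int)), Dom_vseq_2_vit_lst_batch z_full →
    Spec_vseq_2_vit_lst_batch z_full (vseq_2_vit_lst_batch z_full)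

-- ===== LEMMAS AND PROOFS =====

-- the common run/boundary structure: (starts, A's ends-before-T, states) of l from absolute index i
def vruns : List Int → Int → Nat → (List Int × List Int × List Int)
  | [], _, _ => ([], [], [])
  | v :: r, prev, i =>
    let t := vruns r v (i+1)
    if v = prev then t
    else ((i:Int) :: t.1, (if 1 ≤ i then (i:Int) :: t.2.1 else t.2.1), v :: t.2.2)

lemma vseqLoopA_eq (z : List Int) :
    ∀ (n fuel idx : Nat) (prev : Int) (st en sta : List Int),
    idx + n = z.length → 2*n < fuel →
    vseqLoopA z fuel idx prev st en sta =
      (st ++ (vruns (z.drop idx) prev idx).1,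
       en ++ (vruns (z.drop idx) prev idx).2.1,
       sta ++ (vruns (z.drop idx) prev idx).2.2) := by
  intro n
  induction n with
  | zero =>
    intro fuel idx prev st en sta hlen hfuel
    match fuel, hfuel with
    | f+1, _ =>
      have h : ¬ idx < z.length := by omega
      rw [List.drop_eq_nil_of_le (by omega)]
      simp [vseqLoopA, h, vruns]
  | succ n ih =>
    intro fuel idx prev st en sta hlen hfuel
    match fuel, hfuel with
    | f+1, hf =>
      have h : idx < z.length := by omega
      have hdrop : z.drop idx = z[idx] :: z.drop (idx+1) := List.drop_eq_getElem_cons h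
      have hv : z.getD idx 0 = z[idx] := by
        rw [List.getD_eq_getElem?_getD, List.getElem?_eq_getElem h]; rfl
      by_cases hp : prev = z[idx]
      · have hstep : vseqLoopA z (f+1) idx prev st en sta =
            vseqLoopA z f (idx+1) prev st en sta := by
          simp [vseqLoopA, h, hp]
        rw [hstep, ih f (idx+1) prev st en sta (by omega) (by omega), hdrop]
        simp [vruns, ← hp]
      · obtain ⟨f', rfl⟩ : ∃ f', f = f' + 1 := ⟨f - 1, by omega⟩
        have hstep1 : vseqLoopA z (f'+1+1) idx prev st en sta =
            vseqLoopA z (f'+1) idx z[idx] (st ++ [(idx:Int)])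
              (if 1 ≤ idx then en ++ [(idx:Int)] else en) (sta ++ [z[idx]]) := by
          simp [vseqLoopA, h, hp]
        have hstep2 : vseqLoopA z (f'+1) idx z[idx] (st ++ [(idx:Int)])
              (if 1 ≤ idx then en ++ [(idx:Int)] else en) (sta ++ [z[idx]]) =
            vseqLoopA z f' (idx+1) z[idx] (st ++ [(idx:Int)])
              (if 1 ≤ idx then en ++ [(idx:Int)] else en) (sta ++ [z[idx]]) := by
          simp [vseqLoopA, h]
        rw [hstep1, hstep2, ih f' (idx+1) z[idx] _ _ _ (by omega) (by omega), hdrop]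
        have hne : z[idx] ≠ prev := fun he => hp he.symm
        simp only [vruns, if_neg hne, Prod.mk.injEq]
        refine ⟨by simp, ?_, by simp⟩
        split_ifs <;> simp

-- A's ends-before-T list is exactly the positive starts
lemma vruns_end_filter : ∀ (l : List Int) (prev : Int) (i : Nat),
    (vruns l prev i).2.1 = (vruns l prev i).1.filter (fun s => decide (1 ≤ s)) := by
  intro l
  induction l with
  | nil => intro prev i; simp [vruns]
  | cons v r ih =>
    intro prev i
    by_cases hv : v = prev
    · simp only [vruns, if_pos hv]
      exact ih v (i+1)
    · simp only [vruns, if_neg hv, List.filter_cons]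
      by_cases hi : 1 ≤ i
      · have hi' : decide (1 ≤ ((i:Nat):Int)) = true := by
          simp only [decide_eq_true_eq]
          exact_mod_cast hi
        rw [if_pos hi, if_pos hi', ih v (i+1)]
      · have hi' : ¬ (decide (1 ≤ ((i:Nat):Int)) = true) := by
          simp only [decide_eq_true_eq]
          intro h
          exact hi (by exact_mod_cast h)
        rw [if_neg hi, if_neg hi', ih v (i+1)]

lemma vruns_skip : ∀ (l : List Int) (prev : Int) (i : Nat),
    vruns l prev i =
      vruns (l.dropWhile (· == prev)) prev (i + (l.takeWhile (· == prev)).length) := by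
  intro l
  induction l with
  | nil => intro prev i; simp
  | cons v r ih =>
    intro prev i
    by_cases hv : v = prev
    · have hb : (v == prev) = true := by simp [hv]
      simp only [vruns, if_pos hv, List.dropWhile_cons, List.takeWhile_cons, hb,
        List.length_cons, if_true]
      rw [hv, ih prev (i+1)]
      have harith : i + 1 + (r.takeWhile (· == prev)).length
          = i + ((r.takeWhile (· == prev)).length + 1) := by omega
      rw [harith]
    · have hb : (v == prev) = false := by simp [hv]
      simp [List.dropWhile_cons, List.takeWhile_cons, hb]

-- canonical run-length encoding, structurally from the left
def rleRuns : List Int → List (Int × Int)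
  | [] => []
  | v :: r => (v, 1 + ((r.takeWhile (· == v)).length : Int)) :: rleRuns (r.dropWhile (· == v))
termination_by l => l.length
decreasing_by
  simp only [List.length_cons]
  exact Nat.lt_succ_of_le (List.length_dropWhile_le _ r)

lemma rleRuns_nil : rleRuns [] = [] := by rw [rleRuns]

lemma rleRuns_cons (v : Int) (r : List Int) :
    rleRuns (v :: r) =
      (v, 1 + ((r.takeWhile (· == v)).length : Int)) :: rleRuns (r.dropWhile (· == v)) := by
  rw [rleRuns]

-- start positions obtained by prefix-summing run lengths
def runStarts : List (Int × Int) → Int → List Int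
  | [], _ => []
  | (_, n) :: t, pos => pos :: runStarts t (pos + n)

-- the tail of pvRleF's accumulator is inert
lemma pvRleF_inert : ∀ (z : List Int) (p : Int × Int) (t : List (Int × Int)),
    z.foldl pvRleF (p :: t) = z.foldl pvRleF [p] ++ t := by
  intro z
  induction z with
  | nil => intro p t; simp
  | cons v r ih =>
    intro p t
    obtain ⟨u, n⟩ := p
    by_cases hu : u = v
    · simp only [List.foldl_cons, pvRleF, if_pos hu]
      exact ih (u, n+1) t
    · simp only [List.foldl_cons, pvRleF, if_neg hu]
      rw [ih (v,1) ((u,n) :: t), ih (v,1) [(u,n)]]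
      simp

lemma foldl_pvRleF_run : ∀ (z : List Int) (u : Int) (n : Int),
    (z.foldl pvRleF [(u, n)]).reverse =
      (u, n + ((z.takeWhile (· == u)).length : Int)) :: rleRuns (z.dropWhile (· == u)) := by
  intro z
  induction z with
  | nil => intro u n; simp [rleRuns_nil]
  | cons v r ih =>
    intro u n
    by_cases hu : u = v
    · have hb : (v == u) = true := by simp [hu]
      simp only [List.foldl_cons, pvRleF, if_pos hu, List.takeWhile_cons, List.dropWhile_cons,
        hb, if_true, List.length_cons]
      rw [ih u (n+1)]
      congr 1
      push_cast; ring_nf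
    · have hb : (v == u) = false := by
        rw [beq_eq_false_iff_ne]
        exact fun h => hu (Eq.symm h)
      simp only [List.foldl_cons, pvRleF, if_neg hu, List.takeWhile_cons, List.dropWhile_cons, hb]
      rw [pvRleF_inert r (v,1) [(u,n)]]
      simp only [List.reverse_append, List.reverse_cons, List.reverse_nil, List.nil_append,
        List.cons_append]
      rw [ih v 1]
      simp [rleRuns_cons]

lemma foldl_pvRleF_eq_rleRuns : ∀ (z : List Int),
    (z.foldl pvRleF []).reverse = rleRuns z := by
  intro z
  cases z with
  | nil => simp [rleRuns_nil]
  | cons v r =>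
    simp only [List.foldl_cons, pvRleF]
    rw [foldl_pvRleF_run r v 1, rleRuns_cons]

-- B's starts/states fold, characterised
lemma foldl_sv : ∀ (runs : List (Int × Int)) (s0 v0 : List Int) (pos : Int),
    runs.foldl (fun (acc : List Int × List Int × Int) vn =>
        (acc.1 ++ [acc.2.2], acc.2.1 ++ [vn.1], acc.2.2 + vn.2)) (s0, v0, pos) =
      (s0 ++ runStarts runs pos, v0 ++ runs.map Prod.fst,
        pos + (runs.map Prod.snd).sum) := by
  intro runs
  induction runs with
  | nil => intro s0 v0 pos; simp [runStarts]
  | cons vn t ih =>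
    intro s0 v0 pos
    obtain ⟨v, n⟩ := vn
    simp only [List.foldl_cons]
    rw [ih (s0 ++ [pos]) (v0 ++ [v]) (pos + n)]
    simp only [runStarts, List.map_cons, List.sum_cons, List.append_assoc,
      List.singleton_append, Prod.mk.injEq]
    refine ⟨trivial, trivial, by ring⟩

lemma head?_dropWhile_ne (p : Int → Bool) : ∀ (l : List Int) (a : Int),
    (l.dropWhile p).head? = some a → p a = false := by
  intro l
  induction l with
  | nil => intro a h; simp at h
  | cons v r ih =>
    intro a h
    by_cases hv : p v = true
    · rw [List.dropWhile_cons, if_pos hv] at h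
      exact ih a h
    · rw [List.dropWhile_cons, if_neg hv] at h
      simp only [List.head?_cons, Option.some.injEq] at h
      subst h
      exact Bool.eq_false_iff.mpr hv

-- the core: prefix-sum starts and run values equal the vruns boundary and state lists
lemma rle_vruns : ∀ (fuel : Nat) (z : List Int) (prev : Int) (i : Nat),
    z.length ≤ fuel → z.head? ≠ some prev →
    runStarts (rleRuns z) ((i : Nat) : Int) = (vruns z prev i).1 ∧
    (rleRuns z).map Prod.fst = (vruns z prev i).2.2 := by
  intro fuel
  induction fuel with
  | zero =>
    intro z prev i hlen _
    have hz : z = [] := List.eq_nil_of_length_eq_zero (by omega)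
    subst hz
    simp [vruns, rleRuns_nil, runStarts]
  | succ fuel ih =>
    intro z prev i hlen hhead
    cases z with
    | nil => simp [vruns, rleRuns_nil, runStarts]
    | cons v r =>
      have hv : v ≠ prev := fun he => hhead (by rw [he]; rfl)
      have hsplit : (r.takeWhile (· == v)).length + (r.dropWhile (· == v)).length = r.length := by
        have h0 := congrArg List.length (List.takeWhile_append_dropWhile (p := (· == v)) (l := r))
        simp only [List.length_append] at h0
        exact h0
      have ht : vruns r v (i+1) =
          vruns (r.dropWhile (· == v)) v (i + 1 + (r.takeWhile (· == v)).length) :=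
        vruns_skip r v (i+1)
      have hz'head : (r.dropWhile (· == v)).head? ≠ some v := by
        intro ha
        have := head?_dropWhile_ne (· == v) r v ha
        simp at this
      have hIH := ih (r.dropWhile (· == v)) v (i + 1 + (r.takeWhile (· == v)).length)
        (by
          have := List.length_dropWhile_le (· == v) r
          simp only [List.length_cons] at hlen
          omega)
        hz'head
      have hcast : ((i + 1 + (r.takeWhile (· == v)).length : Nat) : Int)
          = ((i : Nat) : Int) + (1 + ((r.takeWhile (· == v)).length : Int)) := by
        push_cast; ring
      simp only [vruns, if_neg hv, rleRuns_cons, runStarts, List.map_cons]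
      rw [ht]
      constructor
      · rw [← hcast, hIH.1]
      · rw [hIH.2]

-- named per-sequence bodies of the two ports (definitionally equal to the map lambdas)
def pvABody (zt : List Int) : List (Int × Int × Int) :=
  let z := zt ++ [-1]
  let T := z.length
  let r := vseqLoopA z (2*T+1) 0 (-1) [] [] []
  let start := r.1
  let «end» := r.2.1 ++ [(T : Int)]
  let state := r.2.2
  (start.zip («end».zip state)).map (fun p => (p.1, p.2.1, p.2.2))

def pvAltBody (seq : List Int) : List (Int × Int × Int) :=
  let z := seq ++ [-1]
  let runs := (z.foldl pvRleF []).reverse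
  let rp : List (Int × Int) × Int :=
    match runs with
    | (u, n) :: t => if u = -1 then (t, n) else (runs, 0)
    | [] => ([], 0)
  let sv := rp.1.foldl (fun (acc : List Int × List Int × Int) vn =>
      (acc.1 ++ [acc.2.2], acc.2.1 ++ [vn.1], acc.2.2 + vn.2)) ([], [], rp.2)
  let starts := sv.1
  let states := sv.2.1
  let ends := starts.filter (fun s => 1 ≤ s) ++ [(z.length : Int)]
  (starts.zip (ends.zip states)).map (fun p => (p.1, p.2.1, p.2.2))

lemma aBody_eq (z_full : List (List Int)) :
    vseq_2_vit_lst_batch z_full = z_full.map pvABody := rfl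

lemma altBody_eq (z_full : List (List Int)) :
    vseq_2_vit_lst_batch_alt z_full = z_full.map pvAltBody := rfl

-- per-sequence body of port B via vruns
lemma portB_elt (zt : List Int) :
    pvAltBody zt =
    ((vruns (zt ++ [-1]) (-1) 0).1.zip
      (((vruns (zt ++ [-1]) (-1) 0).1.filter (fun s => decide (1 ≤ s))
          ++ [((zt ++ [-1]).length : Int)]).zip
        (vruns (zt ++ [-1]) (-1) 0).2.2)).map (fun p => (p.1, p.2.1, p.2.2)) := by
  obtain ⟨v, r, hz⟩ : ∃ v r, zt ++ [-1] = v :: r := by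
    cases zt with
    | nil => exact ⟨-1, [], rfl⟩
    | cons a t => exact ⟨a, t ++ [-1], rfl⟩
  unfold pvAltBody
  rw [hz]
  dsimp only
  rw [foldl_pvRleF_eq_rleRuns (v :: r), rleRuns_cons]
  set k := (r.takeWhile (· == v)).length with hk
  set z' := r.dropWhile (· == v) with hz''
  have hz'head : z'.head? ≠ some v := by
    intro ha
    have := head?_dropWhile_ne (· == v) r v (by rw [← hz'']; exact ha)
    simp at this
  by_cases hv : v = -1
  · -- leading -1 run: skipped by B, and by vruns (prev = -1)
    subst hv
    simp only [reduceIte, foldl_sv, List.nil_append]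
    have hvr : vruns (-1 :: r) (-1) 0 = vruns z' (-1) (1 + k) := by
      simp only [vruns, reduceIte]
      have := vruns_skip r (-1) 1
      rw [this, hz'', hk]
    rw [hvr]
    have hR := rle_vruns z'.length z' (-1) (1+k) (le_refl _) hz'head
    have hcast : (((1 + k : Nat)) : Int) = 1 + (k : Int) := by push_cast; ring
    rw [← hcast, hR.1, hR.2]
  · -- no leading -1 run: B keeps all runs, vruns sees the first boundary at 0
    simp only [if_neg hv, foldl_sv, List.nil_append]
    have hhead : ((v :: r) : List Int).head? ≠ some (-1) := by
      simp only [List.head?_cons, ne_eq, Option.some.injEq]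
      exact hv
    have hR := rle_vruns (v :: r).length (v :: r) (-1) 0 (le_refl _) hhead
    rw [rleRuns_cons] at hR
    have h0 : ((0 : Nat) : Int) = 0 := rfl
    rw [← h0, hR.1, hR.2]

-- per-sequence body of port A, rewritten through vruns
lemma portA_elt (zt : List Int) :
    pvABody zt =
    (((vruns (zt ++ [-1]) (-1) 0).1).zip
      ((((vruns (zt ++ [-1]) (-1) 0).2.1) ++ [((zt ++ [-1]).length : Int)]).zip
        ((vruns (zt ++ [-1]) (-1) 0).2.2))).map (fun p => (p.1, p.2.1, p.2.2)) := by
  unfold pvABody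
  have h := vseqLoopA_eq (zt ++ [-1]) (zt ++ [-1]).length (2*(zt ++ [-1]).length+1) 0 (-1)
    [] [] [] (by omega) (by omega)
  simp only [List.drop_zero, List.nil_append] at h
  simp only [h]

-- ===== VERDICT (by name: the statement is the Claim_ definition above) =====
theorem vseq_2_vit_lst_batch_spec : Claim_equal_vseq_2_vit_lst_batch := by
  intro z_full _
  show vseq_2_vit_lst_batch z_full = vseq_2_vit_lst_batch_alt z_full
  rw [aBody_eq, altBody_eq]
  apply List.map_congr_left
  intro zt _
  calc pvABody zt
      = _ := portA_elt zt
    _ = _ := by rw [vruns_end_filter (zt ++ [-1]) (-1) 0]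
    _ = pvAltBody zt := (portB_elt zt).symm
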